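-- pv_equiv track=rewrite | github.com/PoulKalff/renameTools | renameTools.py | findInserts
-- ===== SOURCE A (Python) =====
-- import os, sys, collections
--
-- def findInserts(file):
-- 	result = -1
-- 	hitList = {}
-- 	while 1:
-- 		result = file.find('%', result + 1)
-- 		if result == -1:
-- 			break
-- 		else:
-- 			hitList[result] = int(file[result + 1])
-- 	return collections.OrderedDict(sorted(hitList.items(), reverse=True))
-- ===== SOURCE B (Python) =====
-- import collections
--
-- def findInserts(file):
--     hits = collections.OrderedDict()
--     for i in range(len(file) - 1, -1, -1):
--         if file[i] == '%':
--             hits[i] = int(file[i + 1])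
--     return hits
-- ===== Notes on version B (the rewrite author's own statement) =====
-- stated objective: simpler
-- what changed: B replaces A's repeated str.find loop that collects a dict and then reverse-sorts its items by a single backward scan over the indices that emits the hits already in descending key order, so no sort is needed.
-- outside the precondition, e.g. on findInserts('%'): A raises IndexError, B raises IndexError; on findInserts('%x'): A raises ValueError, B raises ValueError
import Mathlib
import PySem

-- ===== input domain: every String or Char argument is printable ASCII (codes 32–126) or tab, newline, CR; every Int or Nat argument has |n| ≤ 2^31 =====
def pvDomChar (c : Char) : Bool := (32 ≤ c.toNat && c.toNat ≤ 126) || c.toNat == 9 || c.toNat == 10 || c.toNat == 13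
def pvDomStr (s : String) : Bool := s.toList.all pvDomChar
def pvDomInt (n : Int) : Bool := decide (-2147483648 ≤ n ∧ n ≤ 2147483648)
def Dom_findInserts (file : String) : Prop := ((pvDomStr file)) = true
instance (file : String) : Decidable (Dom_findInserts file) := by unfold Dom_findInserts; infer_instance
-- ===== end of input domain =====

-- B replaces A's forward find-loop + dict + reverse sort by a single backward index scan that
-- emits the pairs already in descending key order (objective: simpler; return value only).

-- int(file[i+1]) on a one-character string; the .getD 0 branch is unreachable under Pre_ (Python raises ValueError there)
def pyIntOfChar (c : Char) : Int := (PySem.Int.ofStr? (String.ofList [c])).getD 0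

-- ===== PORT A =====
-- the 'while 1' loop of A; fuel (length+1) strictly bounds the number of iterations, each find advances result
def findInsertsLoop (file : String) : Nat → Int → PySem.Dict Int Int → PySem.Dict Int Int
  | 0, _, hitList => hitList
  | fuel+1, result, hitList =>
    let r := PySem.Str.findFrom file "%" (result + 1)
    if r = -1 then hitList
    else findInsertsLoop file fuel r
      (hitList.insert r (match PySem.Str.pyGet? file (r + 1) with
        | some c => pyIntOfChar c
        | none => 0))   -- none = IndexError in Python, excluded by Pre_

def findInserts (file : String) : List (Int × Int) :=
  PySem.List.sorted2
    (findInsertsLoop file (file.toList.length + 1) (-1) PySem.Dict.empty).items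
    Prod.fst Prod.snd true

-- ===== PORT B =====
def findInserts_alt (file : String) : List (Int × Int) :=
  ((PySem.List.pyRange (PySem.Str.len file - 1) (-1) (-1)).foldl
    (fun hits i =>
      if PySem.Str.pyGet? file i = some '%' then
        hits.insert i (match PySem.Str.pyGet? file (i + 1) with
          | some c => pyIntOfChar c
          | none => 0)   -- none = IndexError in Python, excluded by Pre_
      else hits)
    (PySem.Dict.empty : PySem.Dict Int Int)).items

-- ===== PRECONDITION & SPEC =====
-- Pre_ excludes exactly the inputs on which Python A raises: a '%' at the last position
-- (IndexError on file[result+1]) or a '%' followed by a non-digit (ValueError in int()).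
def Pre_findInserts (file : String) : Prop :=
  ∀ i : Nat, i < file.toList.length → file.toList[i]? = some '%' →
    i + 1 < file.toList.length ∧ (file.toList[i+1]?.getD ' ').isDigit
instance (file : String) : Decidable (Pre_findInserts file) := by
  unfold Pre_findInserts; infer_instance

def pvWitness_findInserts : String := "a%1b%2"

def Spec_findInserts (file : String) (out : List (Int × Int)) : Prop := out = findInserts_alt file
instance (file : String) (out : List (Int × Int)) : Decidable (Spec_findInserts file out) := by
  unfold Spec_findInserts; infer_instance

-- ===== CLAIM (what is proved, stated in full; the proofs are below) =====
def Claim_equal_findInserts : Prop := ∀ (file : String), Dom_findInserts file → Pre_findInserts file → Spec_findInserts file (findInserts file)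

-- ===== LEMMAS AND PROOFS =====

-- value stored for a hit at index i (what both ports compute for int(file[i+1]))
def nextVal (cs : List Char) (i : Nat) : Int :=
  match PySem.Chars.pyGet? cs ((i : Int) + 1) with
  | some c => pyIntOfChar c
  | none => 0

def hitAt (cs : List Char) (i : Nat) : Bool := decide (cs[i]? = some '%')

-- ascending hit pairs with index ≥ s
def pairsFrom (cs : List Char) (s : Nat) : List (Int × Int) :=
  ((List.range cs.length).filter (fun i => decide (s ≤ i) && hitAt cs i)).map
    (fun i : Nat => ((i : Int), nextVal cs i))

-- ascending hit pairs with index < s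
def pairsBelow (cs : List Char) (s : Nat) : List (Int × Int) :=
  ((List.range cs.length).filter (fun i => decide (i < s) && hitAt cs i)).map
    (fun i : Nat => ((i : Int), nextVal cs i))

lemma singleton_prefix_iff {α : Type} (a : α) (l : List α) : [a] <+: l ↔ l.head? = some a := by
  cases l with
  | nil => simp
  | cons x xs =>
    constructor
    · rintro ⟨t, ht⟩; simp_all [List.cons_append]
    · intro h; simp at h; exact ⟨xs, by simp [h]⟩

lemma singleton_infix_iff {α : Type} (a : α) (l : List α) : [a] <:+: l ↔ a ∈ l := by
  constructor
  · intro h; exact h.mem (by simp)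
  · intro h
    obtain ⟨p, q, hpq⟩ := List.append_of_mem h
    exact ⟨p, q, by simp [hpq]⟩

lemma insertBy_front {α : Type} (before : α → α → Bool) (x : α) (acc : List α)
    (h : ∀ y ∈ acc, before x y = true) : PySem.List.insertBy before x acc = x :: acc := by
  cases acc with
  | nil => simp [PySem.List.insertBy]
  | cons y ys => simp [PySem.List.insertBy, h y (by simp)]

lemma sorted2_foldl_aux (xs acc : List (Int × Int))
    (hxs : xs.Pairwise (fun a b => a.1 < b.1))
    (hacc : ∀ x ∈ xs, ∀ y ∈ acc, y.1 < x.1) :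
    xs.foldl (fun acc x =>
      PySem.List.insertBy (fun a b =>
        decide (b.1 < a.1) || (!decide (a.1 < b.1) && decide (b.2 < a.2))) x acc) acc
      = xs.reverse ++ acc := by
  induction xs generalizing acc with
  | nil => simp
  | cons x xs ih =>
    rw [List.foldl_cons, insertBy_front _ _ _ (fun y hy => by
      simp [hacc x (by simp) y hy])]
    rw [ih (x :: acc) (List.Pairwise.of_cons hxs) (fun z hz y hy => by
      rcases List.mem_cons.mp hy with h | h
      · subst h; exact (List.pairwise_cons.mp hxs).1 z hz
      · exact hacc z (List.mem_cons_of_mem x hz) y h)]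
    simp

lemma sorted2_rev_eq_reverse (xs : List (Int × Int))
    (h : xs.Pairwise (fun a b => a.1 < b.1)) :
    PySem.List.sorted2 xs Prod.fst Prod.snd true = xs.reverse := by
  have haux := sorted2_foldl_aux xs [] h (by simp)
  rw [List.append_nil] at haux
  exact haux

lemma hitAt_iff_drop (cs : List Char) (s : Nat) :
    '%' ∈ cs.drop s ↔ ∃ i, s ≤ i ∧ hitAt cs i = true := by
  rw [List.mem_iff_getElem?]
  constructor
  · rintro ⟨k, hk⟩
    exact ⟨s + k, by omega, by simp [hitAt, ← List.getElem?_drop, hk]⟩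
  · rintro ⟨i, hsi, hi⟩
    exact ⟨i - s, by simp [hitAt] at hi; rw [List.getElem?_drop]; rwa [show s + (i - s) = i by omega]⟩

lemma pairsFrom_shift (cs : List Char) (s r : Nat) (hsr : s ≤ r)
    (h : ∀ i, s ≤ i → i < r → hitAt cs i = false) :
    pairsFrom cs s = pairsFrom cs r := by
  unfold pairsFrom
  congr 1
  apply List.filter_congr
  intro i _
  by_cases h1 : i < s
  · simp [Nat.not_le.mpr h1, Nat.not_le.mpr (by omega : i < r)]
  · by_cases h2 : i < r
    · simp [h i (by omega) h2]
    · simp [Nat.le_of_not_lt h1, Nat.le_of_not_lt h2]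

lemma pairsFrom_none (cs : List Char) (s : Nat)
    (h : ∀ i, s ≤ i → hitAt cs i = false) : pairsFrom cs s = [] := by
  unfold pairsFrom
  rw [List.filter_eq_nil_iff.mpr, List.map_nil]
  intro i _
  by_cases h1 : s ≤ i
  · simp [h i h1]
  · simp [h1]

lemma filter_range_high (cs : List Char) (r : Nat) (p : Nat → Bool)
    (hp : ∀ i, i < r → p i = false) (hr : r ≤ cs.length) :
    (List.range cs.length).filter p
      = ((List.range (cs.length - r)).map (fun x => r + x)).filter p := by
  rw [show cs.length = r + (cs.length - r) by omega, List.range_add, List.filter_append]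
  rw [List.filter_eq_nil_iff.mpr (fun i hi => by simp [hp i (List.mem_range.mp hi)])]
  simp

lemma pairsFrom_cons (cs : List Char) (r : Nat) (hr : r < cs.length)
    (hhit : hitAt cs r = true) :
    pairsFrom cs r = ((r : Int), nextVal cs r) :: pairsFrom cs (r+1) := by
  unfold pairsFrom
  rw [filter_range_high cs r _ (fun i hi => by simp [Nat.not_le.mpr hi]) (by omega),
      filter_range_high cs (r+1) (fun i => decide (r+1 ≤ i) && hitAt cs i)
        (fun i hi => by simp [Nat.not_le.mpr hi]) (by omega)]
  rw [show cs.length - r = 1 + (cs.length - (r+1)) by omega, List.range_add, List.map_append,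
      List.filter_append]
  rw [show (List.range 1).map (fun x => r + x) = [r] by simp]
  rw [show List.filter (fun i => decide (r ≤ i) && hitAt cs i) [r] = [r] by simp [hhit]]
  rw [List.map_map,
      show ((fun x => r + x) ∘ (fun x => 1 + x)) = (fun x : Nat => r + 1 + x) from
        funext (fun x => by simp; omega)]
  simp only [List.map_cons, List.singleton_append]
  congr 1
  congr 1
  apply List.filter_congr
  intro i hi
  obtain ⟨x, -, hx⟩ := List.mem_map.mp hi
  subst hx
  simp [show r ≤ r+1+x by omega, show r+1 ≤ r+1+x by omega]

lemma pairsBelow_zero (cs : List Char) : pairsBelow cs 0 = [] := by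
  unfold pairsBelow
  rw [List.filter_eq_nil_iff.mpr (fun i _ => by simp), List.map_nil]

lemma pairsBelow_succ (cs : List Char) (s : Nat) (hs : s < cs.length) :
    pairsBelow cs (s+1)
      = pairsBelow cs s ++ (if hitAt cs s then [((s : Int), nextVal cs s)] else []) := by
  unfold pairsBelow
  have hsplit : ∀ t : Nat, t ≤ cs.length →
      (List.range cs.length).filter (fun i => decide (i < t) && hitAt cs i)
        = (List.range t).filter (hitAt cs) := by
    intro t ht
    have h2 : List.filter (fun i => decide (i < t) && hitAt cs i)
        ((List.range (cs.length - t)).map (fun x => t + x)) = [] := by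
      apply List.filter_eq_nil_iff.mpr
      intro i hi
      obtain ⟨x, -, hx⟩ := List.mem_map.mp hi
      subst hx
      simp [show ¬ (t + x < t) by omega]
    rw [show cs.length = t + (cs.length - t) by omega, List.range_add, List.filter_append, h2,
        List.append_nil]
    apply List.filter_congr
    intro i hi
    simp [List.mem_range.mp hi]
  rw [hsplit (s+1) (by omega), hsplit s (by omega), List.range_succ, List.filter_append,
      List.map_append]
  congr 1
  rw [List.filter_cons]
  by_cases h : hitAt cs s <;> simp [h]

lemma pairsBelow_all (cs : List Char) (s : Nat) (hs : cs.length ≤ s) :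
    pairsBelow cs s = pairsFrom cs 0 := by
  unfold pairsBelow pairsFrom
  congr 1
  apply List.filter_congr
  intro i hi
  simp [show i < s by have := List.mem_range.mp hi; omega]

lemma pairsFrom_pairwise (cs : List Char) :
    (pairsFrom cs 0).Pairwise (fun a b => a.1 < b.1) := by
  unfold pairsFrom
  exact List.Pairwise.map _ (fun i j (h : i < j) => by simp; exact_mod_cast h)
    (List.Pairwise.filter _ List.pairwise_lt_range)

-- characterization of A's while-loop
lemma loopA_eq (file : String) (s : Nat) (hs : s ≤ file.toList.length)
    (fuel : Nat) (hfuel : file.toList.length + 1 - s ≤ fuel)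
    (d : PySem.Dict Int Int) (hd : ∀ p ∈ d.items, p.1 < (s : Int)) :
    (findInsertsLoop file fuel ((s : Int) - 1) d).items
      = d.items ++ pairsFrom file.toList s := by
  induction fuel generalizing s d with
  | zero => omega
  | succ fuel ih =>
    set cs := file.toList with hcs
    rw [findInsertsLoop]
    have harith : (s : Int) - 1 + 1 = ((s : Nat) : Int) := by ring
    rw [harith, PySem.Str.findFrom_eq]
    have hsub : ("%" : String).toList = ['%'] := by decide
    rw [hsub]
    have hfind := PySem.Chars.findFrom_natCast cs ['%'] s hs
    by_cases hneg : PySem.Chars.findFrom cs ['%'] (s : Int) none = -1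
    · rw [if_pos hneg]
      have hnin := (PySem.Chars.findFrom_natCast_eq_neg_one_iff cs ['%'] s hs).mp hneg
      rw [singleton_infix_iff] at hnin
      rw [pairsFrom_none cs s (fun i hi => by
        by_contra hc
        exact hnin ((hitAt_iff_drop cs s).mpr ⟨i, hi, by simpa using hc⟩))]
      simp
    · rw [if_neg hneg]
      obtain ⟨hle, hpre, hmin⟩ := PySem.Chars.findFrom_natCast_spec cs ['%'] s hs hneg
      set r := PySem.Chars.findFrom cs ['%'] (s : Int) none with hr
      have hr0 : 0 ≤ r := le_trans (by exact_mod_cast Int.natCast_nonneg s) hle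
      have hrn : r = ((r.toNat : Nat) : Int) := by omega
      have hhead : cs[r.toNat]? = some '%' := by
        rw [← List.head?_drop]
        exact (singleton_prefix_iff '%' _).mp hpre
      have hrlt : r.toNat < cs.length := by
        rcases List.getElem?_eq_some_iff.mp hhead with ⟨h, -⟩
        exact h
      have hsr : s ≤ r.toNat := by omega
      have hnc : d.contains r = false := by
        unfold PySem.Dict.contains
        rw [List.any_eq_false]
        intro p hp
        have := hd p hp
        simp only [beq_iff_eq]
        omega
      have hval : (match PySem.Str.pyGet? file (r + 1) with
          | some c => pyIntOfChar c | none => 0) = nextVal cs r.toNat := by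
        unfold nextVal
        rw [show PySem.Str.pyGet? file (r+1) = PySem.Chars.pyGet? cs (r+1) from rfl, ← hrn]
      rw [hval]
      have hstep : findInsertsLoop file fuel r (d.insert r (nextVal cs r.toNat))
          = findInsertsLoop file fuel (((r.toNat + 1 : Nat) : Int) - 1)
              (d.insert r (nextVal cs r.toNat)) := by
        congr 1
        push_cast
        omega
      have hmin' : ∀ i, s ≤ i → i < r.toNat → hitAt cs i = false := by
        intro i h1 h2
        unfold hitAt
        simp only [decide_eq_false_iff_not]
        intro hc
        exact hmin i h1 h2 ((singleton_prefix_iff '%' _).mpr (by rw [List.head?_drop]; exact hc))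
      rw [hstep, ih (r.toNat + 1) (by omega) (by omega) _ (fun p hp => by
        rw [PySem.Dict.items_insert_of_not_contains d _ hnc] at hp
        rcases List.mem_append.mp hp with h | h
        · have := hd p h; push_cast; omega
        · simp at h; rw [h]; simp)]
      rw [PySem.Dict.items_insert_of_not_contains d _ hnc,
          pairsFrom_shift cs s r.toNat hsr hmin',
          pairsFrom_cons cs r.toNat hrlt (by unfold hitAt; simp [hhead])]
      rw [← hrn]
      simp

-- characterization of B's backward loop
lemma loopB_eq (file : String) (s : Nat) (hs : s ≤ file.toList.length)
    (d : PySem.Dict Int Int) (hd : ∀ p ∈ d.items, (s : Int) ≤ p.1) :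
    ((PySem.List.pyRange ((s : Int) - 1) (-1) (-1)).foldl
      (fun hits i =>
        if PySem.Str.pyGet? file i = some '%' then
          hits.insert i (match PySem.Str.pyGet? file (i + 1) with
            | some c => pyIntOfChar c
            | none => 0)
        else hits) d).items
      = d.items ++ (pairsBelow file.toList s).reverse := by
  induction s generalizing d with
  | zero =>
    rw [show (((0:Nat)):Int) - 1 = -1 by simp]
    rw [PySem.List.pyRange_neg_one_eq_nil (by norm_num), List.foldl_nil, pairsBelow_zero]
    simp
  | succ s ih =>
    set cs := file.toList with hcs
    have hlt : s < cs.length := by omega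
    rw [show (((s+1:Nat)):Int) - 1 = ((s:Nat):Int) by push_cast; ring]
    rw [PySem.List.pyRange_neg_one_cons (by omega : (-1:Int) < ((s:Nat):Int)), List.foldl_cons]
    have hstep : (if PySem.Str.pyGet? file ((s:Nat):Int) = some '%' then
          d.insert ((s:Nat):Int) (match PySem.Str.pyGet? file (((s:Nat):Int) + 1) with
            | some c => pyIntOfChar c
            | none => 0)
        else d)
        = if hitAt cs s then d.insert ((s:Nat):Int) (nextVal cs s) else d := by
      rw [show PySem.Str.pyGet? file ((s:Nat):Int) = cs[s]? from PySem.List.pyGet?_natCast cs s]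
      by_cases hh : cs[s]? = some '%'
      · rw [if_pos hh, if_pos (show hitAt cs s = true by simp [hitAt, hh])]
        rfl
      · rw [if_neg hh, if_neg (show ¬ hitAt cs s = true by simp [hitAt, hh])]
    rw [hstep]
    by_cases hhit : hitAt cs s
    · rw [if_pos hhit]
      have hnc : d.contains ((s:Nat):Int) = false := by
        unfold PySem.Dict.contains
        rw [List.any_eq_false]
        intro p hp
        have := hd p hp
        simp only [beq_iff_eq]
        push_cast at this ⊢
        omega
      rw [ih (by omega) _ (fun p hp => by
        rw [PySem.Dict.items_insert_of_not_contains d _ hnc] at hp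
        rcases List.mem_append.mp hp with h | h
        · have := hd p h; push_cast at this ⊢; omega
        · simp at h; rw [h])]
      rw [PySem.Dict.items_insert_of_not_contains d _ hnc,
          pairsBelow_succ cs s hlt, if_pos hhit]
      simp [List.reverse_append]
    · rw [if_neg hhit]
      rw [ih (by omega) d (fun p hp => by have := hd p hp; push_cast at this ⊢; omega)]
      rw [pairsBelow_succ cs s hlt, if_neg hhit]
      simp

-- ===== VERDICT (by name: the statement is the Claim_ definition above) =====
theorem findInserts_spec : Claim_equal_findInserts := by
  intro file _ _
  unfold Spec_findInserts findInserts findInserts_alt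
  have hA := loopA_eq file 0 (by omega) (file.toList.length + 1) (by omega) PySem.Dict.empty
    (fun p hp => by simp [PySem.Dict.empty] at hp)
  rw [show (((0:Nat)):Int) - 1 = -1 by simp] at hA
  rw [hA, show (PySem.Dict.empty : PySem.Dict Int Int).items = [] from rfl, List.nil_append,
      sorted2_rev_eq_reverse _ (pairsFrom_pairwise file.toList)]
  have hB := loopB_eq file file.toList.length le_rfl PySem.Dict.empty
    (fun p hp => by simp [PySem.Dict.empty] at hp)
  rw [show ((file.toList.length : Nat) : Int) - 1 = PySem.Str.len file - 1 from rfl] at hB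
  rw [hB, show (PySem.Dict.empty : PySem.Dict Int Int).items = [] from rfl, List.nil_append,
      pairsBelow_all file.toList file.toList.length le_rfl]
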